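-- pv_equiv track=rewrite | github.com/RenanCecchin/Line-Code-Viewer | line_codes.py | pseudoternary
-- ===== SOURCE A (Python) =====
-- def pseudoternary(bits_sequence):
--     pseudoternary_bits = []
--     positive_wave = True
--
--     for bit in bits_sequence:
--         if bit == 1:
--             pseudoternary_bits.append(0)
--         else:
--             if positive_wave:
--                 pseudoternary_bits.append(1)
--                 positive_wave = False
--             else:
--                 pseudoternary_bits.append(-1)
--                 positive_wave = True
--
--     return pseudoternary_bits
-- ===== SOURCE B (Python) =====
-- def pseudoternary(bits_sequence):
--     # pass 1: prefix counts of non-1 bits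
--     zeros = []
--     c = 0
--     for b in bits_sequence:
--         if b != 1:
--             c += 1
--         zeros.append(c)
--     # pass 2: map each bit via its zero-order index
--     return [0 if b == 1 else 1 - 2 * ((z - 1) % 2)
--             for b, z in zip(bits_sequence, zeros)]
-- ===== Notes on version B (the rewrite author's own statement) =====
-- stated objective: alternative
-- what changed: Replaces the sequential boolean wave toggle with a two-pass scheme: first a prefix-count table of non-1 bits, then an independent mapping pass computing each pulse sign arithmetically from its zero-order index.
import Mathlib
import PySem

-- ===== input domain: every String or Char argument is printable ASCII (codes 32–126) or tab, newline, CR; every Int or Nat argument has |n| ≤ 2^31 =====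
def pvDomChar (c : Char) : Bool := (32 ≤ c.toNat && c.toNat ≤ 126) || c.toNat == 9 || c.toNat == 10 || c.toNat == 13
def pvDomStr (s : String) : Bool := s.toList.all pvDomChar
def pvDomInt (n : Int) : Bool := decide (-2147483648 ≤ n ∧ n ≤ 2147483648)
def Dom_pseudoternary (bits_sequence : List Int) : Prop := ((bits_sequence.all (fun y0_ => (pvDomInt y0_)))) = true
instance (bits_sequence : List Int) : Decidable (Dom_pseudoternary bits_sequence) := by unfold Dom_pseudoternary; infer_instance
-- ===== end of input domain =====

-- B replaces A's sequential wave toggle with a prefix-count table plus a separate arithmetic mapping pass (alternative decomposition, same cost).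


-- ===== PORT A =====
-- transliteration of A: one fold carrying (pseudoternary_bits, positive_wave)
def pvStepA (st : List Int × Bool) (bit : Int) : List Int × Bool :=
  if bit == 1 then (st.1 ++ [0], st.2)
  else if st.2 then (st.1 ++ [1], false)
  else (st.1 ++ [-1], true)

def pseudoternary (bits_sequence : List Int) : List Int :=
  (bits_sequence.foldl pvStepA ([], true)).1

-- ===== PORT B =====
-- pass 1 of Source B: running prefix counts of non-1 bits (c is the counter)
def pvZeros (bits : List Int) (c : Int) : List Int :=
  match bits with
  | [] => []
  | b :: rest =>
      let c' := if b != 1 then c + 1 else c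
      c' :: pvZeros rest c'

-- pass 2 of Source B: the zip-comprehension mapping each (bit, prefix count) to a pulse
def pseudoternary_alt (bits_sequence : List Int) : List Int :=
  ((bits_sequence.zip (pvZeros bits_sequence 0)).map
    (fun p => if p.1 == 1 then 0 else 1 - 2 * PySem.Int.mod (p.2 - 1) 2))

-- ===== PRECONDITION & SPEC =====
def Spec_pseudoternary (bits_sequence : List Int) (out : List Int) : Prop := out = pseudoternary_alt bits_sequence
instance (bits_sequence : List Int) (out : List Int) : Decidable (Spec_pseudoternary bits_sequence out) := by unfold Spec_pseudoternary; infer_instance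

-- ===== CLAIM (what is proved, stated in full; the proofs are below) =====
def Claim_equal_pseudoternary : Prop := ∀ (bits_sequence : List Int), Dom_pseudoternary bits_sequence → Spec_pseudoternary bits_sequence (pseudoternary bits_sequence)

-- ===== LEMMAS AND PROOFS =====

-- A's loop, written as structural recursion on the input (wave flag as state)
def pvGoA (bits : List Int) (w : Bool) : List Int :=
  match bits with
  | [] => []
  | b :: rest =>
      if b == 1 then 0 :: pvGoA rest w
      else (if w then 1 else -1) :: pvGoA rest (!w)

theorem pvFoldA_eq (bits : List Int) (acc : List Int) (w : Bool) :
    (bits.foldl pvStepA (acc, w)).1 = acc ++ pvGoA bits w := by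
  induction bits generalizing acc w with
  | nil => simp [pvGoA]
  | cons b rest ih =>
      rw [List.foldl_cons]
      by_cases hb : b == 1
      · rw [show pvStepA (acc, w) b = (acc ++ [0], w) by simp [pvStepA, hb]]
        rw [ih]; simp [pvGoA, hb]
      · cases w
        · rw [show pvStepA (acc, false) b = (acc ++ [-1], true) by simp [pvStepA, hb]]
          rw [ih]; simp [pvGoA, hb]
        · rw [show pvStepA (acc, true) b = (acc ++ [1], false) by simp [pvStepA, hb]]
          rw [ih]; simp [pvGoA, hb]

theorem pvGoA_eq_alt (bits : List Int) (c : Int) (hc : 0 ≤ c) :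
    pvGoA bits (c % 2 == 0) =
      (bits.zip (pvZeros bits c)).map
        (fun p => if p.1 == 1 then 0 else 1 - 2 * PySem.Int.mod (p.2 - 1) 2) := by
  induction bits generalizing c with
  | nil => simp [pvGoA, pvZeros]
  | cons b rest ih =>
      by_cases hb : b == 1
      · have hbe : b = 1 := by simpa using hb
        have hbne : (b != 1) = false := by simpa using hb
        rw [show pvGoA (b :: rest) (c % 2 == 0) = 0 :: pvGoA rest (c % 2 == 0) from by
              simp [pvGoA, hb],
            show pvZeros (b :: rest) c = c :: pvZeros rest c from by simp [pvZeros, hbne]]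
        simp only [List.zip_cons_cons, List.map_cons]
        refine congrArg₂ List.cons ?_ (ih c hc)
        simp [hb]
      · have hbne : (b != 1) = true := by simpa using hb
        have hmod : PySem.Int.mod c 2 = c % 2 :=
          PySem.Int.mod_eq_emod_of_pos (by omega)
        have hflip : (!(c % 2 == 0)) = ((c + 1) % 2 == 0) := by
          rcases Int.emod_two_eq c with h | h <;> simp [h] <;> omega
        have htail : pvGoA rest (!(c % 2 == 0)) =
            (rest.zip (pvZeros rest (c + 1))).map
              (fun p => if p.1 == 1 then 0 else 1 - 2 * PySem.Int.mod (p.2 - 1) 2) := by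
          rw [hflip]; exact ih (c + 1) (by omega)
        rw [show pvGoA (b :: rest) (c % 2 == 0)
              = (if (c % 2 == 0) then (1 : Int) else -1) :: pvGoA rest (!(c % 2 == 0)) from by
              simp [pvGoA, hb],
            show pvZeros (b :: rest) c = (c + 1) :: pvZeros rest (c + 1) from by
              simp [pvZeros, hbne]]
        simp only [List.zip_cons_cons, List.map_cons]
        refine congrArg₂ List.cons ?_ htail
        rw [if_neg (by simp [hb] : ¬ ((b == 1) = true))]
        have hcc : c + 1 - 1 = c := by ring
        rw [hcc, hmod]
        rcases Int.emod_two_eq c with h | h <;> simp [h]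

-- ===== VERDICT (by name: the statement is the Claim_ definition above) =====
theorem pseudoternary_spec : Claim_equal_pseudoternary := by
  intro bits _
  unfold Spec_pseudoternary pseudoternary pseudoternary_alt
  rw [pvFoldA_eq]
  have := pvGoA_eq_alt bits 0 le_rfl
  simpa using this
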